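-- pv_equiv track=rewrite | github.com/egecansev/ProjectEuler | Problem_103/Special subset sums optimum.py | equal_length_subsets_check
-- ===== SOURCE A (Python) =====
-- from itertools import combinations
--
-- def equal_length_subsets_check(A, a, b):
--     combs = list(combinations(A, a + b))
--     combos = []
--     for comb in combs:
--         combo = list(combinations(comb, a))
--         for combined in combo:
--             aux_combined = []
--             for item in comb:
--                 if item not in combined:
--                     aux_combined.append(item)
--             if (tuple(aux_combined), combined) in combos:
--                 break
--             if sum(combined) == sum(aux_combined):
--                 return False
--     return True
-- ===== SOURCE B (Python) =====
-- def equal_length_subsets_check(A, a, b):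
--     # Depth-first search: each element joins the first group, the second group,
--     # or is skipped; only the running sum difference between the groups is kept.
--     def search(items, diff, na, nb):
--         if na == 0 and nb == 0:
--             return diff == 0
--         if na + nb > len(items) or not items:
--             return False
--         head, tail = items[0], items[1:]
--         return ((na > 0 and search(tail, diff + head, na - 1, nb))
--                 or (nb > 0 and search(tail, diff - head, na, nb - 1))
--                 or search(tail, diff, na, nb))
--
--     return not search(list(A), 0, a, b)
-- ===== Notes on version B (the rewrite author's own statement) =====
-- stated objective: alternative
-- what changed: B replaces A's materialized nested itertools.combinations enumerations (with per-pair complement rebuilding) by a depth-first search that assigns each element to the first group, the second group, or skips it, tracking only the running sum difference; Pre_ excludes lists with duplicate elements, where A's value-based complement test ('item not in combined') makes the positional vs value-based subset readings diverge and either answer is defensible, and the inputs where A raises ValueError from a negative combinations size.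
-- outside the precondition, e.g. on equal_length_subsets_check([1, 1], 1, 1): A returns True, B returns False
import Mathlib
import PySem

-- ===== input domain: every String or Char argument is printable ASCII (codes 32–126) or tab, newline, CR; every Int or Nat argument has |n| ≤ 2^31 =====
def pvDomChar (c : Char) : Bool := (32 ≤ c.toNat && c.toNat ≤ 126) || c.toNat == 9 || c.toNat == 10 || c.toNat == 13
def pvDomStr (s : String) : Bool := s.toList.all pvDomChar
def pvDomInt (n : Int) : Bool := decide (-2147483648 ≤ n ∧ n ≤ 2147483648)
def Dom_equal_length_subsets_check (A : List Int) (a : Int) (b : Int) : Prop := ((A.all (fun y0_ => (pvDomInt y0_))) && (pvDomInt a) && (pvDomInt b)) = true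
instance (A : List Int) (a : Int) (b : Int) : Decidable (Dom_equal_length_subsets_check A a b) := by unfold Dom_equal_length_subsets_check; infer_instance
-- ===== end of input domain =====

-- B replaces A's materialized nested `combinations` enumerations by a depth-first
-- search that sends each element to the first group, the second group, or skips it,
-- tracking only the running sum difference; objective: alternative algorithm.


-- ===== PORT A =====
-- itertools.combinations(xs, k) in lexicographic positional order
def pyCombs (xs : List Int) (k : Nat) : List (List Int) :=
  match k, xs with
  | 0, _ => [[]]
  | _ + 1, [] => []
  | k + 1, x :: t => (pyCombs t k).map (fun c => x :: c) ++ pyCombs t (k + 1)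

-- the inner `for combined in combo` loop: some false = `return False`, none = loop ended
-- (A's `combos` list is never appended to, so the membership test is on the empty list)
def innerA (comb : List Int) : List (List Int) → Option Bool
  | [] => none
  | combined :: rest =>
      let aux := comb.filter (fun item => !(combined.contains item))
      if ([] : List (List Int × List Int)).contains (aux, combined) then none
      else if combined.sum == aux.sum then some false
      else innerA comb rest

-- the outer `for comb in combs` loop
def outerA (a : Int) : List (List Int) → Bool
  | [] => true
  | comb :: rest =>
      match innerA comb (pyCombs comb a.toNat) with
      | some r => r
      | none => outerA a rest

def equal_length_subsets_check (A : List Int) (a : Int) (b : Int) : Bool :=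
  outerA a (pyCombs A (a + b).toNat)

-- ===== PORT B =====
def searchB (items : List Int) (diff : Int) (na nb : Int) : Bool :=
  if na == 0 && nb == 0 then diff == 0
  else if (items.length : Int) < na + nb || items.isEmpty then false
  else
    match items with
    | [] => false
    | head :: tail =>
        (na > 0 && searchB tail (diff + head) (na - 1) nb) ||
        (nb > 0 && searchB tail (diff - head) na (nb - 1)) ||
        searchB tail diff na nb

def equal_length_subsets_check_alt (A : List Int) (a : Int) (b : Int) : Bool :=
  !(searchB A 0 a b)

-- ===== PRECONDITION & SPEC =====
-- Pre_ excludes (i) the inputs where A raises ValueError (a negative size that actually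
-- reaches itertools.combinations), and (ii) lists with duplicate elements, where A's
-- value-based complement test ('item not in combined') makes the positional and the
-- value-based readings of 'disjoint subsets' diverge and either answer is defensible.
def Pre_equal_length_subsets_check (A : List Int) (a : Int) (b : Int) : Prop :=
  A.Nodup ∧ 0 ≤ a + b ∧ (0 ≤ a ∨ (A.length : Int) < a + b)
instance (A : List Int) (a : Int) (b : Int) : Decidable (Pre_equal_length_subsets_check A a b) := by unfold Pre_equal_length_subsets_check; infer_instance

def pvWitness_equal_length_subsets_check : List Int × Int × Int := ([1, 2, 3], 1, 1)

def Spec_equal_length_subsets_check (A : List Int) (a : Int) (b : Int) (out : Bool) : Prop := out = equal_length_subsets_check_alt A a b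
instance (A : List Int) (a : Int) (b : Int) (out : Bool) : Decidable (Spec_equal_length_subsets_check A a b out) := by unfold Spec_equal_length_subsets_check; infer_instance

-- ===== CLAIM (what is proved, stated in full; the proofs are below) =====
def Claim_equal_equal_length_subsets_check : Prop := ∀ (A : List Int) (a : Int) (b : Int), Dom_equal_length_subsets_check A a b → Pre_equal_length_subsets_check A a b → Spec_equal_length_subsets_check A a b (equal_length_subsets_check A a b)

-- ===== LEMMAS AND PROOFS =====

-- the condition A tests, phrased on (combined, comb)
def condA (c comb : List Int) : Prop := c.sum = (comb.filter (fun i => !(c.contains i))).sum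

-- (chosen, rest) are two disjoint positional sub-selections of the list
inductive Pick : List Int → List Int → List Int → Prop
  | nil : Pick [] [] []
  | skip (x : Int) {t c r : List Int} : Pick t c r → Pick (x :: t) c r
  | left (x : Int) {t c r : List Int} : Pick t c r → Pick (x :: t) (x :: c) r
  | right (x : Int) {t c r : List Int} : Pick t c r → Pick (x :: t) c (x :: r)

theorem pick_nil_nil (xs : List Int) : Pick xs [] [] := by
  induction xs with
  | nil => exact Pick.nil
  | cons x t ih => exact Pick.skip x ih

theorem pick_nil_inv {c r : List Int} (h : Pick [] c r) : c = [] ∧ r = [] := by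
  cases h; exact ⟨rfl, rfl⟩

theorem pick_length_le {xs c r : List Int} (h : Pick xs c r) :
    c.length + r.length ≤ xs.length := by
  induction h with
  | nil => simp
  | skip x h ih => simp; omega
  | left x h ih => simp; omega
  | right x h ih => simp; omega

theorem mem_pyCombs {xs l : List Int} {k : Nat} :
    l ∈ pyCombs xs k ↔ l.Sublist xs ∧ l.length = k := by
  induction xs generalizing l k with
  | nil =>
    cases k with
    | zero => simp [pyCombs, List.length_eq_zero_iff]
    | succ k =>
      simp [pyCombs]
      rintro rfl; simp
  | cons x t ih =>
    cases k with
    | zero =>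
      simp [pyCombs, List.length_eq_zero_iff]
      rintro rfl; simp
    | succ k =>
      simp only [pyCombs, List.mem_append, List.mem_map]
      constructor
      · rintro (⟨c, hc, rfl⟩ | h)
        · obtain ⟨hs, hl⟩ := ih.mp hc
          exact ⟨List.Sublist.cons₂ x hs, by simp [hl]⟩
        · obtain ⟨hs, hl⟩ := ih.mp h
          exact ⟨hs.cons x, hl⟩
      · rintro ⟨hs, hl⟩
        rcases List.sublist_cons_iff.mp hs with h | ⟨c, rfl, hc⟩
        · exact Or.inr (ih.mpr ⟨h, hl⟩)
        · exact Or.inl ⟨c, ih.mpr ⟨hc, by simpa using hl⟩, rfl⟩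

theorem innerA_some_false_iff (comb : List Int) (lst : List (List Int)) :
    innerA comb lst = some false ↔ ∃ c ∈ lst, condA c comb := by
  induction lst with
  | nil => simp [innerA]
  | cons combined rest ih =>
    simp only [innerA, List.contains, List.elem_nil, if_false, Bool.false_eq_true]
    by_cases h : combined.sum = (comb.filter (fun i => !(combined.contains i))).sum
    · simp [h, condA]
    · have : (combined.sum == (comb.filter (fun item => !(combined.contains item))).sum) = false := by
        simpa using h
      simp only [this, Bool.false_eq_true, if_false, ih]
      constructor
      · rintro ⟨c, hc, hcd⟩; exact ⟨c, List.mem_cons_of_mem _ hc, hcd⟩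
      · rintro ⟨c, hc, hcd⟩
        rcases List.mem_cons.mp hc with rfl | hc
        · exact absurd hcd h
        · exact ⟨c, hc, hcd⟩

theorem innerA_ne_some_true (comb : List Int) (lst : List (List Int)) :
    innerA comb lst ≠ some true := by
  induction lst with
  | nil => simp [innerA]
  | cons combined rest ih =>
    simp only [innerA]
    split_ifs with h1 h2
    · simp
    · simp
    · exact ih

theorem outerA_true_iff (a : Int) (combs : List (List Int)) :
    outerA a combs = true ↔ ¬ ∃ comb ∈ combs, ∃ c ∈ pyCombs comb a.toNat, condA c comb := by
  induction combs with
  | nil => simp [outerA]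
  | cons comb rest ih =>
    simp only [outerA]
    rcases h : innerA comb (pyCombs comb a.toNat) with _ | r
    · have hno : ¬ ∃ c ∈ pyCombs comb a.toNat, condA c comb := by
        intro hex
        rw [← innerA_some_false_iff] at hex
        rw [hex] at h; cases h
      simp only [ih]
      constructor
      · intro hn hex
        rcases hex with ⟨cb, hcb, hc⟩
        rcases List.mem_cons.mp hcb with rfl | hcb
        · exact hno hc
        · exact hn ⟨cb, hcb, hc⟩
      · intro hn hex
        rcases hex with ⟨cb, hcb, hc⟩
        exact hn ⟨cb, List.mem_cons_of_mem _ hcb, hc⟩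
    · cases r with
      | true => exact absurd h (innerA_ne_some_true comb _)
      | false =>
        have hex := (innerA_some_false_iff comb _).mp h
        simp only [Bool.false_eq_true, false_iff]
        intro hn
        exact hn ⟨comb, List.mem_cons_self, hex⟩

-- characterization of B's search
theorem searchB_true_iff (items : List Int) :
    ∀ (diff na nb : Int),
      searchB items diff na nb = true ↔
        ∃ c r, Pick items c r ∧ (c.length : Int) = na ∧ (r.length : Int) = nb ∧
          diff + c.sum = r.sum := by
  induction items with
  | nil =>
    intro diff na nb
    by_cases h : na = 0 ∧ nb = 0
    · obtain ⟨rfl, rfl⟩ := h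
      rw [searchB.eq_def]
      simp only [BEq.rfl, Bool.and_self, if_true, beq_iff_eq]
      constructor
      · intro hc
        exact ⟨[], [], Pick.nil, by simp, by simp, by simpa using hc⟩
      · rintro ⟨c, r, hp, hlc, hlr, hcd⟩
        obtain ⟨rfl, rfl⟩ := pick_nil_inv hp
        simpa using hcd
    · rw [searchB.eq_def]
      have hguard : (na == 0 && nb == 0) = false := by
        rcases (not_and_or.mp h) with h' | h' <;> simp [h']
      simp only [hguard, Bool.false_eq_true, if_false, List.isEmpty_nil, Bool.or_true, if_true]
      constructor
      · intro hf; cases hf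
      · rintro ⟨c, r, hp, hlc, hlr, _⟩
        obtain ⟨rfl, rfl⟩ := pick_nil_inv hp
        simp at hlc hlr
        exact absurd ⟨hlc.symm, hlr.symm⟩ h
  | cons x t ih =>
    intro diff na nb
    by_cases h : na = 0 ∧ nb = 0
    · obtain ⟨rfl, rfl⟩ := h
      rw [searchB.eq_def]
      simp only [BEq.rfl, Bool.and_self, if_true, beq_iff_eq]
      constructor
      · intro hc
        exact ⟨[], [], pick_nil_nil _, by simp, by simp, by simpa using hc⟩
      · rintro ⟨c, r, hp, hlc, hlr, hcd⟩
        have hc' : c = [] := List.eq_nil_of_length_eq_zero (by exact_mod_cast hlc)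
        have hr' : r = [] := List.eq_nil_of_length_eq_zero (by exact_mod_cast hlr)
        subst hc'; subst hr'
        simpa using hcd
    · rw [searchB.eq_def]
      have hguard : (na == 0 && nb == 0) = false := by
        rcases (not_and_or.mp h) with h' | h' <;> simp [h']
      by_cases hbig : ((x :: t).length : Int) < na + nb
      · simp only [hguard, Bool.false_eq_true, if_false, hbig, decide_true, Bool.true_or, if_true]
        constructor
        · intro hf; cases hf
        · rintro ⟨c, r, hp, hlc, hlr, _⟩
          have := pick_length_le hp
          simp only [List.length_cons] at hbig this
          omega
      have hbig' : (decide (((x :: t).length : Int) < na + nb) || (x :: t).isEmpty) = false := by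
        simp only [List.isEmpty_cons, Bool.or_false, decide_eq_false_iff_not]
        exact hbig
      simp only [hguard, Bool.false_eq_true, if_false, hbig', Bool.or_eq_true,
        Bool.and_eq_true, decide_eq_true_eq, ih]
      constructor
      · rintro ((⟨hna, ⟨c, r, hp, hlc, hlr, hcd⟩⟩ | ⟨hnb, ⟨c, r, hp, hlc, hlr, hcd⟩⟩) | ⟨c, r, hp, hlc, hlr, hcd⟩)
        · refine ⟨x :: c, r, Pick.left x hp, ?_, hlr, ?_⟩
          · simp only [List.length_cons]; push_cast; omega
          · simp only [List.sum_cons]; omega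
        · refine ⟨c, x :: r, Pick.right x hp, hlc, ?_, ?_⟩
          · simp only [List.length_cons]; push_cast; omega
          · simp only [List.sum_cons]; omega
        · exact ⟨c, r, Pick.skip x hp, hlc, hlr, hcd⟩
      · rintro ⟨c, r, hp, hlc, hlr, hcd⟩
        cases hp with
        | skip _ hp => exact Or.inr ⟨_, _, hp, hlc, hlr, hcd⟩
        | left _ hp =>
          rename_i c0
          refine Or.inl (Or.inl ⟨?_, c0, r, hp, ?_, hlr, ?_⟩)
          · simp only [List.length_cons] at hlc; push_cast at hlc; omega
          · simp only [List.length_cons] at hlc; push_cast at hlc; omega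
          · simp only [List.sum_cons] at hcd; omega
        | right _ hp =>
          rename_i r0
          refine Or.inl (Or.inr ⟨?_, c, r0, hp, hlc, ?_, ?_⟩)
          · simp only [List.length_cons] at hlr; push_cast at hlr; omega
          · simp only [List.length_cons] at hlr; push_cast at hlr; omega
          · simp only [List.sum_cons] at hcd; omega

-- bridge L1: a Pick gives a comb with combined a sublist of it
theorem pick_to_comb {xs c r : List Int} (h : Pick xs c r) :
    ∃ comb, comb.Sublist xs ∧ c.Sublist comb ∧ comb.Perm (c ++ r) := by
  induction h with
  | nil => exact ⟨[], by simp, by simp, by simp⟩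
  | skip x h ih =>
    obtain ⟨comb, h1, h2, h3⟩ := ih
    exact ⟨comb, h1.cons x, h2, h3⟩
  | left x h ih =>
    obtain ⟨comb, h1, h2, h3⟩ := ih
    exact ⟨x :: comb, List.Sublist.cons₂ x h1, List.Sublist.cons₂ x h2,
      List.Perm.cons x h3⟩
  | right x h ih =>
    obtain ⟨comb, h1, h2, h3⟩ := ih
    exact ⟨x :: comb, List.Sublist.cons₂ x h1, h2.cons x,
      ((List.Perm.cons x h3).trans List.perm_middle.symm)⟩

-- bridge L2: nested sublists give a Pick
theorem sublists_to_pick {comb xs : List Int} (hcx : comb.Sublist xs) :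
    ∀ {c : List Int}, c.Sublist comb → ∃ r, Pick xs c r ∧ comb.Perm (c ++ r) := by
  induction hcx with
  | slnil =>
    intro c hc
    have := List.sublist_nil.mp hc
    subst this
    exact ⟨[], Pick.nil, by simp⟩
  | cons x hcx ih =>
    intro c hc
    obtain ⟨r, hp, hperm⟩ := ih hc
    exact ⟨r, Pick.skip x hp, hperm⟩
  | cons₂ x hcx ih =>
    intro c hc
    rcases List.sublist_cons_iff.mp hc with h | ⟨c', rfl, hc'⟩
    · obtain ⟨r, hp, hperm⟩ := ih h
      exact ⟨x :: r, Pick.right x hp,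
        ((List.Perm.cons x hperm).trans List.perm_middle.symm)⟩
    · obtain ⟨r, hp, hperm⟩ := ih hc'
      exact ⟨r, Pick.left x hp, List.Perm.cons x hperm⟩

-- bridge L3: on a duplicate-free comb the value-based complement is exactly r
theorem condA_iff {c comb r : List Int} (h : comb.Perm (c ++ r)) (hnd : comb.Nodup) :
    condA c comb ↔ c.sum = r.sum := by
  unfold condA
  rw [(h.filter (fun i => !(c.contains i))).sum_eq, List.filter_append]
  have hnd2 : (c ++ r).Nodup := hnd.perm h
  have hcf : c.filter (fun i => !(c.contains i)) = [] := by
    rw [List.filter_eq_nil_iff]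
    intro a ha; simp [ha]
  have hrf : r.filter (fun i => !(c.contains i)) = r := by
    rw [List.filter_eq_self]
    intro a ha
    have : a ∉ c := fun hac => (List.disjoint_of_nodup_append hnd2) hac ha
    simp [this]
  rw [hcf, hrf, List.nil_append]

-- the two existentials agree under Pre_
theorem exists_iff (A : List Int) (a b : Int) (hnd : A.Nodup) (hab : 0 ≤ a + b)
    (hA : 0 ≤ a ∨ (A.length : Int) < a + b) :
    (∃ comb ∈ pyCombs A (a + b).toNat, ∃ c ∈ pyCombs comb a.toNat, condA c comb) ↔
    (∃ c r, Pick A c r ∧ (c.length : Int) = a ∧ (r.length : Int) = b ∧ c.sum = r.sum) := by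
  constructor
  · rintro ⟨comb, hcomb, c, hc, hcd⟩
    obtain ⟨hcs, hcl⟩ := mem_pyCombs.mp hcomb
    obtain ⟨hss, hsl⟩ := mem_pyCombs.mp hc
    have ha : 0 ≤ a := by
      rcases hA with h | h
      · exact h
      · exfalso
        have := hcs.length_le
        omega
    obtain ⟨r, hp, hperm⟩ := sublists_to_pick hcs hss
    refine ⟨c, r, hp, by omega, ?_, (condA_iff hperm (hcs.nodup hnd)).mp hcd⟩
    · have := hperm.length_eq
      simp at this
      omega
  · rintro ⟨c, r, hp, hlc, hlr, hcd⟩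
    obtain ⟨comb, h1, h2, h3⟩ := pick_to_comb hp
    have hlen : comb.length = c.length + r.length := by
      have := h3.length_eq; simpa using this
    refine ⟨comb, mem_pyCombs.mpr ⟨h1, by omega⟩,
      c, mem_pyCombs.mpr ⟨h2, by omega⟩, (condA_iff h3 (h1.nodup hnd)).mpr hcd⟩

-- ===== VERDICT (by name: the statement is the Claim_ definition above) =====
theorem equal_length_subsets_check_spec : Claim_equal_equal_length_subsets_check := by
  intro A a b _ hpre
  obtain ⟨hnd, hab, hA⟩ := hpre
  unfold Spec_equal_length_subsets_check
  unfold equal_length_subsets_check equal_length_subsets_check_alt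
  have hA' := outerA_true_iff a (pyCombs A (a + b).toNat)
  have hB := searchB_true_iff A 0 a b
  have hB' : searchB A 0 a b = true ↔
      ∃ c r, Pick A c r ∧ (c.length : Int) = a ∧ (r.length : Int) = b ∧ c.sum = r.sum := by
    rw [hB]
    constructor
    · rintro ⟨c, r, hp, h1, h2, h3⟩; exact ⟨c, r, hp, h1, h2, by omega⟩
    · rintro ⟨c, r, hp, h1, h2, h3⟩; exact ⟨c, r, hp, h1, h2, by omega⟩
  have hiff := exists_iff A a b hnd hab hA
  cases hout : outerA a (pyCombs A (a + b).toNat) with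
  | true =>
    have hnex := (hA'.mp hout)
    have : searchB A 0 a b = false := by
      cases hs : searchB A 0 a b with
      | false => rfl
      | true =>
        exact absurd (hiff.mpr (hB'.mp hs)) hnex
    simp [this]
  | false =>
    have hex : ∃ comb ∈ pyCombs A (a + b).toNat, ∃ c ∈ pyCombs comb a.toNat, condA c comb := by
      by_contra hn
      have := hA'.mpr hn
      rw [hout] at this; cases this
    have : searchB A 0 a b = true := hB'.mpr (hiff.mp hex)
    simp [this]
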